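-- pv_equiv track=rewrite | github.com/abdal-hussein/Programming-at-SeattleU | CPSC 3400 Languages & Computation/HW2 - Python Time Processor/hw2.py | get_sorted_times
-- ===== SOURCE A (Python) =====
-- def get_sorted_times(time_list):
--     """ Sorts the times in the list from earliest to latest
--
--     :param time_list: a list of time tuples
--     :return: a sorted list of times from earliest to latest
--     """
--     sorted_times = sorted(time_list)                                # Order times numerically
--     am_times = [time for time in sorted_times if time[2] == 'AM']   # Separate AM times ...
--     pm_times = [time for time in sorted_times if time[2] == 'PM']   # from PM times
--     sorted_times = [time for time in am_times if time[0] == 12]     # Append 12AM times first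
--     sorted_times += [time for time in am_times if time[0] != 12]    # Append remaining AM times
--     sorted_times += [time for time in pm_times if time[0] == 12]    # Append 12PM times
--     sorted_times += [time for time in pm_times if time[0] != 12]    # Append remaining PM times
--     return sorted_times
-- ===== SOURCE B (Python) =====
-- def get_sorted_times(time_list):
--     """ Sorts the times in the list from earliest to latest (one keyed sort). """
--     def rank(t):
--         if t[2] == 'AM':
--             return 0 if t[0] == 12 else 1
--         return 2 if t[0] == 12 else 3
--     kept = [t for t in time_list if t[2] == 'AM' or t[2] == 'PM']
--     return sorted(kept, key=lambda t: (rank(t), t))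
-- ===== Notes on version B (the rewrite author's own statement) =====
-- stated objective: simpler
-- what changed: A sorts the whole list and then makes four separate filter/concatenation passes (AM/PM split, 12-vs-non-12 within each); B filters once to the AM/PM entries and performs a single sorted() call keyed by (group rank, tuple), where rank is 0 for 12AM, 1 for other AM, 2 for 12PM, 3 for other PM.
import Mathlib
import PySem

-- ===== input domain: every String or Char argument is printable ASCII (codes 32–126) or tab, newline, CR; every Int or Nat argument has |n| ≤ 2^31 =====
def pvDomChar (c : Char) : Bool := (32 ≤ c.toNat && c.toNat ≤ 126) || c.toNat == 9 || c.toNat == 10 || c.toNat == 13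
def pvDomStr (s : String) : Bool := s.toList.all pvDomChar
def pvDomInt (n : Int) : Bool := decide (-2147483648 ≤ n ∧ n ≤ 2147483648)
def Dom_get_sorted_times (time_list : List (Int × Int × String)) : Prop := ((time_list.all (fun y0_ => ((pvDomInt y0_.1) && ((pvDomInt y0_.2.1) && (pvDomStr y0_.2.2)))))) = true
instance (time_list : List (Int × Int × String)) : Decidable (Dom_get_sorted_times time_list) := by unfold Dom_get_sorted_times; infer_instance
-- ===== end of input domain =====

-- B replaces A's sort-then-four-filter-passes with one filter plus a single keyed sort (simpler decomposition).

-- ===== PORT A =====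
-- Python compares tuples lexicographically: sorted(time_list) is ported as a sort keyed by the lex triple.
def get_sorted_times (time_list : List (Int × Int × String)) : List (Int × Int × String) :=
  let sorted_times := PySem.List.sorted time_list (fun t => toLex (t.1, toLex (t.2.1, t.2.2)))
  let am_times := sorted_times.filter (fun t => t.2.2 == "AM")
  let pm_times := sorted_times.filter (fun t => t.2.2 == "PM")
  let out := am_times.filter (fun t => t.1 == 12)
  let out := out ++ am_times.filter (fun t => !(t.1 == 12))
  let out := out ++ pm_times.filter (fun t => t.1 == 12)
  let out := out ++ pm_times.filter (fun t => !(t.1 == 12))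
  out

-- ===== PORT B =====
def pvRank (t : Int × Int × String) : Int :=
  if t.2.2 == "AM" then (if t.1 == 12 then 0 else 1)
  else (if t.1 == 12 then 2 else 3)

-- one filter, then one stable sort keyed by (rank, tuple); the tuple tie-break is the lex triple
def get_sorted_times_alt (time_list : List (Int × Int × String)) : List (Int × Int × String) :=
  let kept := time_list.filter (fun t => t.2.2 == "AM" || t.2.2 == "PM")
  PySem.List.sorted2 kept pvRank (fun t => toLex (t.1, toLex (t.2.1, t.2.2)))

-- ===== PRECONDITION & SPEC =====
def Spec_get_sorted_times (time_list : List (Int × Int × String)) (out : List (Int × Int × String)) : Prop := out = get_sorted_times_alt time_list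
instance (time_list : List (Int × Int × String)) (out : List (Int × Int × String)) : Decidable (Spec_get_sorted_times time_list out) := by unfold Spec_get_sorted_times; infer_instance

-- ===== CLAIM (what is proved, stated in full; the proofs are below) =====
def Claim_equal_get_sorted_times : Prop := ∀ (time_list : List (Int × Int × String)), Dom_get_sorted_times time_list → Spec_get_sorted_times time_list (get_sorted_times time_list)

-- ===== LEMMAS AND PROOFS =====

def pvLexT (t : Int × Int × String) : Lex (Int × Lex (Int × String)) := toLex (t.1, toLex (t.2.1, t.2.2))

def pvKey (t : Int × Int × String) : Lex (Int × Lex (Int × Lex (Int × String))) := toLex (pvRank t, pvLexT t)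

lemma pvBeforeEq :
    (fun (a b : Int × Int × String) => decide (pvRank a < pvRank b) || (!decide (pvRank b < pvRank a) && decide (pvLexT a < pvLexT b)))
      = fun a b => decide (pvKey a < pvKey b) := by
  funext a b
  by_cases h1 : pvRank a < pvRank b <;> by_cases h2 : pvRank b < pvRank a <;>
    by_cases h3 : pvLexT a < pvLexT b <;>
    simp [pvKey, Prod.Lex.lt_iff, h1, h2, h3] <;> omega

lemma pvSorted2Eq (xs : List (Int × Int × String)) :
    PySem.List.sorted2 xs pvRank pvLexT = PySem.List.sorted xs pvKey := by
  show xs.foldl (fun acc x => PySem.List.insertBy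
      (fun a b => decide (pvRank a < pvRank b) || (!decide (pvRank b < pvRank a) && decide (pvLexT a < pvLexT b))) x acc) [] = _
  rw [pvBeforeEq, PySem.List.sorted_eq_foldl_insertBy]

lemma pvKeyInj : Function.Injective pvKey := by
  intro a b h
  simp only [pvKey, pvLexT, toLex_inj, Prod.mk.injEq] at h
  obtain ⟨a1, a2, a3⟩ := a
  obtain ⟨b1, b2, b3⟩ := b
  simp_all

lemma pvKeyLe {a b : Int × Int × String}
    (h : pvRank a < pvRank b ∨ (pvRank a = pvRank b ∧ pvLexT a ≤ pvLexT b)) : pvKey a ≤ pvKey b := by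
  rw [pvKey, pvKey, Prod.Lex.le_iff]
  exact h

lemma pvRank0 {t : Int × Int × String} (h1 : t.2.2 = "AM") (h2 : t.1 = 12) : pvRank t = 0 := by
  simp [pvRank, h1, h2]
lemma pvRank1 {t : Int × Int × String} (h1 : t.2.2 = "AM") (h2 : ¬ t.1 = 12) : pvRank t = 1 := by
  simp [pvRank, h1, h2]
lemma pvRank2 {t : Int × Int × String} (h1 : t.2.2 = "PM") (h2 : t.1 = 12) : pvRank t = 2 := by
  simp [pvRank, h1, h2]
lemma pvRank3 {t : Int × Int × String} (h1 : t.2.2 = "PM") (h2 : ¬ t.1 = 12) : pvRank t = 3 := by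
  simp [pvRank, h1, h2]

-- the four chunks of A's output, over an arbitrary base list S
lemma pvChunksPerm (S : List (Int × Int × String)) :
    (((((S.filter (fun t => t.2.2 == "AM")).filter (fun t => t.1 == 12))
      ++ ((S.filter (fun t => t.2.2 == "AM")).filter (fun t => !(t.1 == 12))))
      ++ ((S.filter (fun t => t.2.2 == "PM")).filter (fun t => t.1 == 12)))
      ++ ((S.filter (fun t => t.2.2 == "PM")).filter (fun t => !(t.1 == 12)))).Perm
      (S.filter (fun t => t.2.2 == "AM" || t.2.2 == "PM")) := by
  set am := S.filter (fun t => t.2.2 == "AM") with ham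
  set pm := S.filter (fun t => t.2.2 == "PM") with hpm
  have h1 : (am.filter (fun t => t.1 == 12) ++ am.filter (fun t => !(t.1 == 12))).Perm am :=
    List.filter_append_perm _ _
  have h2 : (pm.filter (fun t => t.1 == 12) ++ pm.filter (fun t => !(t.1 == 12))).Perm pm :=
    List.filter_append_perm _ _
  have hamF : (S.filter (fun t => t.2.2 == "AM" || t.2.2 == "PM")).filter (fun t => t.2.2 == "AM") = am := by
    rw [List.filter_filter, ham]
    apply List.filter_congr
    intro t _
    by_cases h : t.2.2 = "AM" <;> simp [h]
  have hpmF : (S.filter (fun t => t.2.2 == "AM" || t.2.2 == "PM")).filter (fun t => !(t.2.2 == "AM")) = pm := by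
    rw [List.filter_filter, hpm]
    apply List.filter_congr
    intro t _
    by_cases h : t.2.2 = "AM"
    · simp [h]
    · simp [beq_eq_false_iff_ne.mpr h]
  have h3 : (am ++ pm).Perm (S.filter (fun t => t.2.2 == "AM" || t.2.2 == "PM")) := by
    rw [← hamF, ← hpmF]
    exact List.filter_append_perm _ _
  rw [List.append_assoc]
  exact (h1.append h2).trans h3

lemma pvChunksPairwise (S : List (Int × Int × String))
    (hS : S.Pairwise (fun a b => pvLexT a ≤ pvLexT b)) :
    (((((S.filter (fun t => t.2.2 == "AM")).filter (fun t => t.1 == 12))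
      ++ ((S.filter (fun t => t.2.2 == "AM")).filter (fun t => !(t.1 == 12))))
      ++ ((S.filter (fun t => t.2.2 == "PM")).filter (fun t => t.1 == 12)))
      ++ ((S.filter (fun t => t.2.2 == "PM")).filter (fun t => !(t.1 == 12)))).Pairwise
      (fun a b => pvKey a ≤ pvKey b) := by
  have mem0 : ∀ t ∈ (S.filter (fun t => t.2.2 == "AM")).filter (fun t => t.1 == 12), pvRank t = 0 := by
    intro t ht; simp [List.mem_filter] at ht; exact pvRank0 (by tauto) (by tauto)
  have mem1 : ∀ t ∈ (S.filter (fun t => t.2.2 == "AM")).filter (fun t => !(t.1 == 12)), pvRank t = 1 := by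
    intro t ht; simp [List.mem_filter] at ht; exact pvRank1 (by tauto) (by tauto)
  have mem2 : ∀ t ∈ (S.filter (fun t => t.2.2 == "PM")).filter (fun t => t.1 == 12), pvRank t = 2 := by
    intro t ht; simp [List.mem_filter] at ht; exact pvRank2 (by tauto) (by tauto)
  have mem3 : ∀ t ∈ (S.filter (fun t => t.2.2 == "PM")).filter (fun t => !(t.1 == 12)), pvRank t = 3 := by
    intro t ht; simp [List.mem_filter] at ht; exact pvRank3 (by tauto) (by tauto)
  have pw : ∀ (p q : (Int × Int × String) → Bool),
      ((S.filter p).filter q).Pairwise (fun a b => pvLexT a ≤ pvLexT b) :=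
    fun p q => (hS.filter p).filter q
  have chunk : ∀ (p q : (Int × Int × String) → Bool) (r : Int),
      (∀ t ∈ (S.filter p).filter q, pvRank t = r) →
      ((S.filter p).filter q).Pairwise (fun a b => pvKey a ≤ pvKey b) := by
    intro p q r hr
    refine (pw p q).imp_of_mem ?_
    intro a b ha hb hle
    exact pvKeyLe (Or.inr ⟨(hr a ha).trans (hr b hb).symm, hle⟩)
  rw [List.pairwise_append]
  refine ⟨?_, chunk _ _ 3 mem3, ?_⟩
  · rw [List.pairwise_append]
    refine ⟨?_, chunk _ _ 2 mem2, ?_⟩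
    · rw [List.pairwise_append]
      refine ⟨chunk _ _ 0 mem0, chunk _ _ 1 mem1, ?_⟩
      · intro a ha b hb
        exact pvKeyLe (Or.inl (by rw [mem0 a ha, mem1 b hb]; norm_num))
    · intro a ha b hb
      have hra : pvRank a = 0 ∨ pvRank a = 1 := by
        rcases List.mem_append.mp ha with h | h
        · exact Or.inl (mem0 a h)
        · exact Or.inr (mem1 a h)
      refine pvKeyLe (Or.inl ?_)
      rw [mem2 b hb]
      rcases hra with h | h <;> rw [h] <;> norm_num
  · intro a ha b hb
    have hra : pvRank a = 0 ∨ pvRank a = 1 ∨ pvRank a = 2 := by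
      rcases List.mem_append.mp ha with h | h
      · rcases List.mem_append.mp h with h' | h'
        · exact Or.inl (mem0 a h')
        · exact Or.inr (Or.inl (mem1 a h'))
      · exact Or.inr (Or.inr (mem2 a h))
    refine pvKeyLe (Or.inl ?_)
    rw [mem3 b hb]
    rcases hra with h | h | h <;> rw [h] <;> norm_num

-- ===== VERDICT (by name: the statement is the Claim_ definition above) =====
theorem get_sorted_times_spec : Claim_equal_get_sorted_times := by
  intro tl _
  unfold Spec_get_sorted_times
  show (((((PySem.List.sorted tl pvLexT).filter (fun t => t.2.2 == "AM")).filter (fun t => t.1 == 12)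
      ++ ((PySem.List.sorted tl pvLexT).filter (fun t => t.2.2 == "AM")).filter (fun t => !(t.1 == 12)))
      ++ ((PySem.List.sorted tl pvLexT).filter (fun t => t.2.2 == "PM")).filter (fun t => t.1 == 12))
      ++ ((PySem.List.sorted tl pvLexT).filter (fun t => t.2.2 == "PM")).filter (fun t => !(t.1 == 12)))
      = PySem.List.sorted2 (tl.filter (fun t => t.2.2 == "AM" || t.2.2 == "PM")) pvRank pvLexT
  rw [pvSorted2Eq]
  apply PySem.List.eq_of_perm_of_pairwise_le_of_injective pvKey pvKeyInj
  · exact ((pvChunksPerm _).trans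
      (((PySem.List.sorted_perm tl pvLexT false).filter _).trans
        (PySem.List.sorted_perm _ pvKey false).symm))
  · exact pvChunksPairwise _ (PySem.List.sorted_pairwise tl pvLexT)
  · exact PySem.List.sorted_pairwise _ pvKey
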